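-- pv_equiv track=rewrite | github.com/PolinaNiki/-Computer-vision1 | 2.py | find_bias
-- ===== SOURCE A (Python) =====
-- def find_bias(image1, image2):
--      for i in range(len(image1)):
--          for j in range(len(image1[i])):
--              if image1[i][j] == 1:
--                  find_i = i
--                  find_j = j
--      for i in range(len(image2)):
--          for j in range(len(image2[i])):
--              if image2[i][j] == 1:
--                  bias_i = abs(find_i - i)
--                  bias_j = abs(find_j - j)
--      return bias_i, bias_j
-- ===== SOURCE B (Python) =====
-- def find_bias(image1, image2):
--     def last_one(image):
--         for i in range(len(image) - 1, -1, -1):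
--             row = image[i]
--             for j in range(len(row) - 1, -1, -1):
--                 if row[j] == 1:
--                     return i, j
--         raise ValueError("image contains no pixel equal to 1")
--     i1, j1 = last_one(image1)
--     i2, j2 = last_one(image2)
--     return abs(i1 - i2), abs(j1 - j2)
-- ===== Notes on version B (the rewrite author's own statement) =====
-- stated objective: alternative
-- what changed: Replaces A's two full forward scans with last-assignment-wins locals by a reverse row-major scan that returns at the first 1 found in each image, then one abs-difference computation.
import Mathlib
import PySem

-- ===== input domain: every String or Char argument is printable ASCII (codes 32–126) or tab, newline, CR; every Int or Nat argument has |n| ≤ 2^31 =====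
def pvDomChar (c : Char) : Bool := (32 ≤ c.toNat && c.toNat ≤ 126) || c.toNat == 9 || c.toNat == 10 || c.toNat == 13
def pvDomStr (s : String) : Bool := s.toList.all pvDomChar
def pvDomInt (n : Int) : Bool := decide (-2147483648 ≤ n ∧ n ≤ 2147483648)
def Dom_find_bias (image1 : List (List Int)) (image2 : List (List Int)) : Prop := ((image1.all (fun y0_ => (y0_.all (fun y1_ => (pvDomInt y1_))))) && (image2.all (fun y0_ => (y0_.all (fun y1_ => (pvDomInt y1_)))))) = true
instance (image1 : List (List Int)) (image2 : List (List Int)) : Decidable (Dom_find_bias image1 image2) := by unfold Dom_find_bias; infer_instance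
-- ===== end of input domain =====

-- B replaces the two full forward scans (last assignment wins) by reverse scans with early return; return value only.


-- ===== PORT A =====
def find_bias (image1 : List (List Int)) (image2 : List (List Int)) : Int × Int :=
  -- first loop: find_i/find_j keep being overwritten; final value = position of the last 1 in row-major order
  let find : Option (Int × Int) :=
    (PySem.List.enumerate image1).foldl (fun st p =>
      (PySem.List.enumerate p.2).foldl (fun st2 q =>
        if q.2 = 1 then some (p.1, q.1) else st2) st) none
  -- second loop: bias_i/bias_j overwritten at each 1 of image2; Python raises NameError when a name is unset (excluded by Pre_)
  let bias : Option (Int × Int) :=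
    (PySem.List.enumerate image2).foldl (fun st p =>
      (PySem.List.enumerate p.2).foldl (fun st2 q =>
        if q.2 = 1 then
          match find with
          | some fp => some (|fp.1 - p.1|, |fp.2 - q.1|)
          | none => st2
        else st2) st) none
  match bias with
  | some b => b
  | none => (0, 0)

-- ===== PORT B =====
-- reverse scan of one row (row given reversed, n = original last index): first 1 from the right
def pvLastIdxAux : List Int → Int → Option Int
  | [], _ => none
  | v :: rest, n => if v = 1 then some n else pvLastIdxAux rest (n - 1)

-- reverse scan of the rows (image given reversed, i = original last row index): first row from the bottom holding a 1
def pvLastOneAux : List (List Int) → Int → Option (Int × Int)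
  | [], _ => none
  | row :: rest, i =>
    match pvLastIdxAux row.reverse ((row.length : Int) - 1) with
    | some j => some (i, j)
    | none => pvLastOneAux rest (i - 1)

-- B's helper last_one: position of the last 1 in row-major order, found by scanning backwards with early return
def pvLastOne (image : List (List Int)) : Option (Int × Int) :=
  pvLastOneAux image.reverse ((image.length : Int) - 1)

def find_bias_alt (image1 : List (List Int)) (image2 : List (List Int)) : Int × Int :=
  match pvLastOne image1, pvLastOne image2 with
  | some p1, some p2 => (|p1.1 - p2.1|, |p1.2 - p2.2|)
  | _, _ => (0, 0)  -- B raises ValueError here (outside Pre_)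

-- ===== PRECONDITION & SPEC =====
-- Pre_: exactly the inputs on which Python A returns (both images contain a 1);
-- otherwise A raises NameError (find_i or bias_i unset) and B raises ValueError.
def Pre_find_bias (image1 : List (List Int)) (image2 : List (List Int)) : Prop :=
  (image1.any (fun row => row.any (fun v => v = 1))) = true ∧
  (image2.any (fun row => row.any (fun v => v = 1))) = true
instance (image1 : List (List Int)) (image2 : List (List Int)) : Decidable (Pre_find_bias image1 image2) := by unfold Pre_find_bias; infer_instance
def pvWitness_find_bias : List (List Int) × List (List Int) := ([[0, 1], [1, 0]], [[1]])
def Spec_find_bias (image1 : List (List Int)) (image2 : List (List Int)) (out : Int × Int) : Prop := out = find_bias_alt image1 image2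
instance (image1 : List (List Int)) (image2 : List (List Int)) (out : Int × Int) : Decidable (Spec_find_bias image1 image2 out) := by unfold Spec_find_bias; infer_instance

-- ===== CLAIM (what is proved, stated in full; the proofs are below) =====
def Claim_equal_find_bias : Prop := ∀ (image1 : List (List Int)) (image2 : List (List Int)), Dom_find_bias image1 image2 → Pre_find_bias image1 image2 → Spec_find_bias image1 image2 (find_bias image1 image2)

-- ===== LEMMAS AND PROOFS =====

-- last-update fold over a list = first hit scanning the reverse
theorem pv_foldl_or_last {α β : Type} (g : α → Option β) (l : List α) (init : Option β) :
    l.foldl (fun st x => (g x).or st) init = (l.reverse.findSome? g).or init := by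
  induction l generalizing init with
  | nil => simp
  | cons x t ih =>
    simp only [List.foldl_cons, ih, List.reverse_cons, List.findSome?_append]
    cases t.reverse.findSome? g <;> cases hgx : g x <;> simp [List.findSome?, hgx]

-- the port's if-shaped step is the or-shaped step
theorem pv_step_eq {α β : Type} (p : α → Prop) [DecidablePred p] (h : α → β) :
    (fun (st : Option β) (x : α) => if p x then some (h x) else st)
      = fun st x => ((fun y => if p y then some (h y) else none) x).or st := by
  funext st x; by_cases hx : p x <;> simp [hx]

theorem pv_findSome?_comp_map {α β γ : Type} (g : α → Option β) (h : β → γ) (l : List α) :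
    l.findSome? (fun x => (g x).map h) = (l.findSome? g).map h := by
  induction l with
  | nil => simp
  | cons x t ih => cases hx : g x <;> simp [List.findSome?, hx, ih]

-- the row predicate used on the B side
def pvRowFind (row : List Int) : Option Int :=
  (PySem.List.enumerate row).reverse.findSome? (fun q => if q.2 = 1 then some q.1 else none)

-- reverse scan of a reversed row = first hit on the reversed enumeration
theorem pv_rowLast (row : List Int) :
    pvLastIdxAux row.reverse ((row.length : Int) - 1) = pvRowFind row := by
  induction row using List.reverseRecOn with
  | nil => simp [pvLastIdxAux, pvRowFind]
  | append_singleton l x ih =>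
    simp only [pvRowFind, List.reverse_append, List.reverse_cons, List.reverse_nil,
      List.nil_append, List.cons_append, List.length_append, List.length_cons, List.length_nil,
      PySem.List.enumerate_append, List.findSome?_append, pvLastIdxAux]
    push_cast
    simp only [add_sub_cancel_right]
    by_cases hx : x = (1 : Int)
    · simp [hx, PySem.List.enumerate]
    · simp only [hx, if_false]
      rw [ih]
      simp [pvRowFind, PySem.List.enumerate, hx]

-- reverse scan of the reversed image = first hit on the reversed enumeration
theorem pv_imgLast (image : List (List Int)) :
    pvLastOne image
      = (PySem.List.enumerate image).reverse.findSome?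
          (fun p => (pvRowFind p.2).map (fun j => (p.1, j))) := by
  unfold pvLastOne
  induction image using List.reverseRecOn with
  | nil => simp [pvLastOneAux]
  | append_singleton l x ih =>
    simp only [List.reverse_append, List.reverse_cons, List.reverse_nil, List.nil_append,
      List.cons_append, List.length_append, List.length_cons, List.length_nil,
      PySem.List.enumerate_append, List.findSome?_append, pvLastOneAux, pv_rowLast]
    push_cast
    simp only [add_sub_cancel_right]
    cases hx : pvRowFind x with
    | some j => simp [PySem.List.enumerate, hx]
    | none =>
      simp only [ih]
      simp [PySem.List.enumerate, hx]

-- A's first double loop computes pvLastOne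
theorem pv_find_eq (image : List (List Int)) :
    ((PySem.List.enumerate image).foldl (fun st p =>
        (PySem.List.enumerate p.2).foldl (fun st2 q =>
          if q.2 = 1 then some (p.1, q.1) else st2) st) none)
      = pvLastOne image := by
  rw [pv_imgLast]
  have hin : ∀ (p : Int × List Int) (st : Option (Int × Int)),
      (PySem.List.enumerate p.2).foldl (fun st2 q => if q.2 = 1 then some (p.1, q.1) else st2) st
        = ((pvRowFind p.2).map (fun j => (p.1, j))).or st := by
    intro p st
    rw [pv_step_eq (fun q : Int × Int => q.2 = 1) (fun q => (p.1, q.1)), pv_foldl_or_last]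
    congr 1
    rw [pvRowFind, ← pv_findSome?_comp_map]
    congr 1; funext q; by_cases hq : q.2 = 1 <;> simp [hq]
  have : (fun (st : Option (Int × Int)) (p : Int × List Int) =>
      (PySem.List.enumerate p.2).foldl (fun st2 q => if q.2 = 1 then some (p.1, q.1) else st2) st)
      = fun st p => ((fun p : Int × List Int => (pvRowFind p.2).map (fun j => (p.1, j))) p).or st := by
    funext st p; exact hin p st
  rw [this, pv_foldl_or_last, Option.or_none]

-- A's second double loop, once find is a fixed some f, maps pvLastOne over the bias formula
theorem pv_bias_eq (image : List (List Int)) (f : Int × Int) :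
    ((PySem.List.enumerate image).foldl (fun st p =>
        (PySem.List.enumerate p.2).foldl (fun st2 q =>
          if q.2 = 1 then some (|f.1 - p.1|, |f.2 - q.1|) else st2) st) none)
      = (pvLastOne image).map (fun pr => (|f.1 - pr.1|, |f.2 - pr.2|)) := by
  rw [pv_imgLast, ← pv_findSome?_comp_map]
  have hin : ∀ (p : Int × List Int) (st : Option (Int × Int)),
      (PySem.List.enumerate p.2).foldl (fun st2 q => if q.2 = 1 then some (|f.1 - p.1|, |f.2 - q.1|) else st2) st
        = ((pvRowFind p.2).map (fun j => (|f.1 - p.1|, |f.2 - j|))).or st := by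
    intro p st
    rw [pv_step_eq (fun q : Int × Int => q.2 = 1) (fun q => (|f.1 - p.1|, |f.2 - q.1|)), pv_foldl_or_last]
    congr 1
    rw [pvRowFind, ← pv_findSome?_comp_map]
    congr 1; funext q; by_cases hq : q.2 = 1 <;> simp [hq]
  have : (fun (st : Option (Int × Int)) (p : Int × List Int) =>
      (PySem.List.enumerate p.2).foldl (fun st2 q => if q.2 = 1 then some (|f.1 - p.1|, |f.2 - q.1|) else st2) st)
      = fun st p => ((fun p : Int × List Int =>
          ((pvRowFind p.2).map (fun j => (p.1, j))).map (fun pr => (|f.1 - pr.1|, |f.2 - pr.2|))) p).or st := by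
    funext st p; rw [hin p st]; congr 1; simp [Option.map_map, Function.comp_def]
  rw [this, pv_foldl_or_last, Option.or_none]

-- an image containing a 1 has a last 1
theorem pv_lastOne_isSome (image : List (List Int))
    (h : (image.any (fun row => row.any (fun v => v = 1))) = true) :
    ∃ pr, pvLastOne image = some pr := by
  rw [pv_imgLast]
  rcases Option.eq_none_or_eq_some ((PySem.List.enumerate image).reverse.findSome?
      (fun p => (pvRowFind p.2).map (fun j => (p.1, j)))) with hn | hs
  · exfalso
    rw [List.findSome?_eq_none_iff] at hn
    simp only [List.any_eq_true, decide_eq_true_eq] at h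
    obtain ⟨row, hrow, v, hv, hv1⟩ := h
    obtain ⟨k, hk, hkrow⟩ := List.mem_iff_getElem.mp hrow
    have hmem : ((k : Int), row) ∈ (PySem.List.enumerate image).reverse := by
      rw [List.mem_reverse, PySem.List.mem_enumerate_iff]
      exact ⟨k, hk, by simp [hkrow]⟩
    have := hn _ hmem
    simp only [Option.map_eq_none_iff] at this
    rw [pvRowFind, List.findSome?_eq_none_iff] at this
    obtain ⟨m, hm, hmrow⟩ := List.mem_iff_getElem.mp hv
    have hmem2 : ((m : Int), v) ∈ (PySem.List.enumerate row).reverse := by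
      rw [List.mem_reverse, PySem.List.mem_enumerate_iff]
      exact ⟨m, hm, by simp [hmrow]⟩
    have := this _ hmem2
    simp [hv1] at this
  · exact hs

-- ===== VERDICT (by name: the statement is the Claim_ definition above) =====
theorem find_bias_spec : Claim_equal_find_bias := by
  intro image1 image2 _ hpre
  obtain ⟨h1, h2⟩ := hpre
  unfold Spec_find_bias find_bias find_bias_alt
  obtain ⟨f, hf⟩ := pv_lastOne_isSome image1 h1
  obtain ⟨p2, hp2⟩ := pv_lastOne_isSome image2 h2
  rw [pv_find_eq image1, hf]
  simp only [pv_bias_eq image2 f, hp2, Option.map_some]
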